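-- pv_equiv track=rewrite | github.com/ferparra/my-skills | research/excalidraw-validation/train.py | check_orphaned_groups
-- ===== SOURCE A (Python) =====
-- from collections import Counter
--
-- def check_orphaned_groups(elements: list[dict]) -> tuple[list[str], list[str]]:
--     """Check for groupIds that appear only once (warning only)."""
--     warnings = []
--     all_group_ids: list[str] = []
--     for el in elements:
--         all_group_ids.extend(el.get("groupIds", []))
--
--     group_counts = Counter(all_group_ids)
--     orphaned = [gid for gid, count in group_counts.items() if count == 1]
--     if orphaned:
--         warnings.append(f"Group IDs appearing on only one element (orphaned): {', '.join(orphaned)}")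
--     return [], warnings
-- ===== SOURCE B (Python) =====
-- def check_orphaned_groups(elements: list[dict]) -> tuple[list[str], list[str]]:
--     """Check for groupIds that appear only once (warning only)."""
--     all_group_ids: list[str] = []
--     for el in elements:
--         all_group_ids.extend(el.get("groupIds", []))
--
--     seen_once: set[str] = set()
--     seen_multiple: set[str] = set()
--     for gid in all_group_ids:
--         if gid in seen_multiple:
--             continue
--         if gid in seen_once:
--             seen_once.discard(gid)
--             seen_multiple.add(gid)
--         else:
--             seen_once.add(gid)
--
--     orphaned = [gid for gid in all_group_ids if gid in seen_once]
--     warnings = []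
--     if orphaned:
--         warnings.append(f"Group IDs appearing on only one element (orphaned): {', '.join(orphaned)}")
--     return [], warnings
-- ===== Notes on version B (the rewrite author's own statement) =====
-- stated objective: alternative
-- what changed: Replaces the Counter histogram plus items()-filter with a one-pass two-set state machine (seen_once/seen_multiple) followed by an ordered filter of the collected ids against seen_once.
import Mathlib
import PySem

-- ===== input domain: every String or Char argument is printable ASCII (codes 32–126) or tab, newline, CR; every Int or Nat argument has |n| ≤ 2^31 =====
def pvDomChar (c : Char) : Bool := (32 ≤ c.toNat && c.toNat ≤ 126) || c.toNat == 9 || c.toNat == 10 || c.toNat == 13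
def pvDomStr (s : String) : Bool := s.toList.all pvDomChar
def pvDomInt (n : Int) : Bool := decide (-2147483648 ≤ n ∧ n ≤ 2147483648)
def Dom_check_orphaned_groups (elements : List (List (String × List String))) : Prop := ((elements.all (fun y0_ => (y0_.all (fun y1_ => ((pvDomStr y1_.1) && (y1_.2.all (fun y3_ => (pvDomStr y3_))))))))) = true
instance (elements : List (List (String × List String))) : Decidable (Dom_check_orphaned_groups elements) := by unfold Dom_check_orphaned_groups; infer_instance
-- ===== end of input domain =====

-- B replaces A's Counter histogram by a one-pass two-set state machine plus an ordered filter (objective: alternative).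


-- ===== PORT A =====
def check_orphaned_groups (elements : List (List (String × List String))) : List String × List String :=
  let all_group_ids : List String :=
    elements.foldl (fun acc el => acc ++ (PySem.Dict.mk el).getD "groupIds" []) []
  let group_counts : PySem.Dict String Int := PySem.Dict.counter all_group_ids
  let orphaned : List String :=
    (group_counts.items.filter (fun p => p.2 == 1)).map (fun p => p.1)
  let warnings : List String :=
    if orphaned.isEmpty then []
    else ["Group IDs appearing on only one element (orphaned): " ++ PySem.Str.join ", " orphaned]
  ([], warnings)

-- ===== PORT B =====
-- the body of B's second loop (the two-set state machine step)
def pvStepB (st : PySem.Set String × PySem.Set String) (gid : String) :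
    PySem.Set String × PySem.Set String :=
  if PySem.Set.contains st.2 gid then st
  else if PySem.Set.contains st.1 gid then (PySem.Set.discard st.1 gid, PySem.Set.add st.2 gid)
  else (PySem.Set.add st.1 gid, st.2)

def check_orphaned_groups_alt (elements : List (List (String × List String))) : List String × List String :=
  let all_group_ids : List String :=
    elements.foldl (fun acc el => acc ++ (PySem.Dict.mk el).getD "groupIds" []) []
  let st := all_group_ids.foldl pvStepB (PySem.Set.empty, PySem.Set.empty)
  let orphaned : List String := all_group_ids.filter (fun gid => PySem.Set.contains st.1 gid)
  let warnings : List String :=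
    if orphaned.isEmpty then []
    else ["Group IDs appearing on only one element (orphaned): " ++ PySem.Str.join ", " orphaned]
  ([], warnings)

-- ===== PRECONDITION & SPEC =====
def Spec_check_orphaned_groups (elements : List (List (String × List String))) (out : List String × List String) : Prop := out = check_orphaned_groups_alt elements
instance (elements : List (List (String × List String))) (out : List String × List String) : Decidable (Spec_check_orphaned_groups elements out) := by unfold Spec_check_orphaned_groups; infer_instance

-- ===== CLAIM (what is proved, stated in full; the proofs are below) =====
def Claim_equal_check_orphaned_groups : Prop := ∀ (elements : List (List (String × List String))), Dom_check_orphaned_groups elements → Spec_check_orphaned_groups elements (check_orphaned_groups elements)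

-- ===== LEMMAS AND PROOFS =====

-- invariant of B's loop: the two sets hold exactly the ids seen once / at least twice so far
theorem pvLoopInv (xs : List String) :
    ∀ (once multi : PySem.Set String) (c : String → Nat),
    (∀ g, g ∈ once ↔ c g = 1) → (∀ g, g ∈ multi ↔ 2 ≤ c g) →
    (∀ g, g ∈ (xs.foldl pvStepB (once, multi)).1 ↔ c g + xs.count g = 1) := by
  induction xs with
  | nil => intro once multi c h1 _ g; simpa using h1 g
  | cons x xs ih =>
    intro once multi c h1 h2 g
    have hstep : (x :: xs).foldl pvStepB (once, multi) = xs.foldl pvStepB (pvStepB (once, multi) x) := rfl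
    rw [hstep]
    set c' : String → Nat := fun g => if g = x then c g + 1 else c g with hc'
    have hcount : c' g + xs.count g = c g + (x :: xs).count g := by
      by_cases hg : g = x
      · subst hg; simp [hc']; omega
      · simp [hc', hg, Ne.symm hg]
    rw [← hcount]
    by_cases hm : x ∈ multi
    · have h2x : 2 ≤ c x := (h2 x).mp hm
      have hstate : pvStepB (once, multi) x = (once, multi) := by
        simp [pvStepB, hm]
      rw [hstate]
      exact ih once multi c'
        (by intro g'; rw [h1 g']; by_cases hg' : g' = x
            · subst hg'; simp [hc']; omega
            · simp [hc', hg'])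
        (by intro g'; rw [h2 g']; by_cases hg' : g' = x
            · subst hg'; simp [hc']; omega
            · simp [hc', hg']) g
    · by_cases ho : x ∈ once
      · have h1x : c x = 1 := (h1 x).mp ho
        have hstate : pvStepB (once, multi) x = (PySem.Set.discard once x, PySem.Set.add multi x) := by
          simp [pvStepB, hm, ho]
        rw [hstate]
        exact ih (PySem.Set.discard once x) (PySem.Set.add multi x) c'
          (by intro g'; rw [PySem.Set.mem_discard, h1 g']; by_cases hg' : g' = x
              · subst hg'; simp [hc']; omega
              · simp [hc', hg'])
          (by intro g'; rw [PySem.Set.mem_add, h2 g']; by_cases hg' : g' = x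
              · subst hg'; simp [hc']; omega
              · simp [hc', hg']) g
      · have h0x : c x = 0 := by
          by_contra h
          rcases Nat.lt_or_ge (c x) 2 with hlt | hge
          · exact ho ((h1 x).mpr (by omega))
          · exact hm ((h2 x).mpr hge)
        have hstate : pvStepB (once, multi) x = (PySem.Set.add once x, multi) := by
          simp [pvStepB, hm, ho]
        rw [hstate]
        exact ih (PySem.Set.add once x) multi c'
          (by intro g'; rw [PySem.Set.mem_add, h1 g']; by_cases hg' : g' = x
              · subst hg'; simp [hc']; omega
              · simp [hc', hg'])
          (by intro g'; rw [h2 g']; by_cases hg' : g' = x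
              · subst hg'; simp [hc']; omega
              · simp [hc', hg']) g

theorem pvOfList_sublist (xs : List String) : (PySem.Set.ofList xs).Sublist xs := by
  induction xs with
  | nil => simp [PySem.Set.ofList_nil]
  | cons x xs ih =>
    rw [PySem.Set.ofList_cons]
    have hd : (PySem.Set.discard (PySem.Set.ofList xs) x).Sublist (PySem.Set.ofList xs) := by
      unfold PySem.Set.discard; exact List.filter_sublist
    exact List.Sublist.cons₂ x (hd.trans ih)

-- filtering by an "appears exactly once" predicate gives the same list on xs and on set(xs)
theorem pvFilter_ofList (xs : List String) (p : String → Bool)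
    (hp : ∀ g, p g = true → xs.count g ≤ 1) :
    (PySem.Set.ofList xs).filter p = xs.filter p := by
  have hsub : ((PySem.Set.ofList xs).filter p).Sublist (xs.filter p) :=
    List.Sublist.filter p (pvOfList_sublist xs)
  have hnodup : (xs.filter p).Nodup := by
    rw [List.nodup_iff_count_le_one]
    intro a
    by_cases hpa : p a = true
    · simpa [List.count_filter, hpa] using hp a hpa
    · have : a ∉ xs.filter p := by simp [List.mem_filter, hpa]
      simp [List.count_eq_zero_of_not_mem this]
  have hnd2 : ((PySem.Set.ofList xs).filter p).Nodup := (PySem.Set.nodup_ofList xs).filter p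
  have hperm : ((PySem.Set.ofList xs).filter p).Perm (xs.filter p) := by
    rw [List.perm_ext_iff_of_nodup hnd2 hnodup]
    intro a
    constructor
    · exact fun h => hsub.subset h
    · intro ha
      rw [List.mem_filter] at ha ⊢
      exact ⟨(PySem.Set.mem_ofList xs a).mpr ha.1, ha.2⟩
  exact hsub.eq_of_length hperm.length_eq

-- both ports compute the same orphaned list
theorem pvOrphaned_eq (all : List String) :
    ((PySem.Dict.counter all).items.filter (fun p => p.2 == 1)).map (fun p => p.1)
      = all.filter (fun gid =>
          PySem.Set.contains (all.foldl pvStepB (PySem.Set.empty, PySem.Set.empty)).1 gid) := by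
  have hmem := pvLoopInv all PySem.Set.empty PySem.Set.empty (fun _ => 0)
    (by intro g; simp [PySem.Set.empty]) (by intro g; simp [PySem.Set.empty])
  have hB : (fun gid => PySem.Set.contains (all.foldl pvStepB (PySem.Set.empty, PySem.Set.empty)).1 gid)
      = fun gid => decide (all.count gid = 1) := by
    funext gid
    have hg := hmem gid
    rw [Bool.eq_iff_iff]
    simp only [Nat.zero_add] at hg
    simp only [PySem.Set.contains_iff, decide_eq_true_eq]
    exact hg
  rw [hB, PySem.Dict.items_counter, List.filter_map, List.map_map]
  have hpred : ((fun p => p.2 == 1) ∘ fun k => (k, (List.count k all : Int)))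
      = fun k => decide (all.count k = 1) := by
    funext k
    simp only [Function.comp]
    by_cases h : all.count k = 1
    · simp [h]
    · have h2 : (List.count k all : Int) ≠ 1 := by exact_mod_cast h
      simp [h2, h]
  rw [hpred]
  have hfst : ((fun p => p.1) ∘ fun k => (k, (List.count k all : Int))) = id := by
    funext k; rfl
  rw [hfst, List.map_id]
  exact pvFilter_ofList all _ (by intro g hg; simp at hg; omega)

-- ===== VERDICT (by name: the statement is the Claim_ definition above) =====
theorem check_orphaned_groups_spec : Claim_equal_check_orphaned_groups := by
  intro elements _
  unfold Spec_check_orphaned_groups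
  show (fun orphaned : List String => (([] : List String),
      if orphaned.isEmpty then ([] : List String)
      else ["Group IDs appearing on only one element (orphaned): " ++ PySem.Str.join ", " orphaned]))
      (((PySem.Dict.counter (elements.foldl (fun acc el => acc ++ (PySem.Dict.mk el).getD "groupIds" []) [])).items.filter (fun p => p.2 == 1)).map (fun p => p.1))
    = (fun orphaned : List String => (([] : List String),
      if orphaned.isEmpty then ([] : List String)
      else ["Group IDs appearing on only one element (orphaned): " ++ PySem.Str.join ", " orphaned]))
      ((elements.foldl (fun acc el => acc ++ (PySem.Dict.mk el).getD "groupIds" []) []).filter (fun gid => PySem.Set.contains ((elements.foldl (fun acc el => acc ++ (PySem.Dict.mk el).getD "groupIds" []) []).foldl pvStepB (PySem.Set.empty, PySem.Set.empty)).1 gid))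
  exact congrArg (fun orphaned : List String => (([] : List String),
      if orphaned.isEmpty then ([] : List String)
      else ["Group IDs appearing on only one element (orphaned): " ++ PySem.Str.join ", " orphaned])) (pvOrphaned_eq (elements.foldl (fun acc el => acc ++ (PySem.Dict.mk el).getD "groupIds" []) []))
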